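-- pv_equiv track=rewrite | github.com/zerowater91/Secure-Scan-Tools | SSCan.py | get_headers_scan
-- ===== SOURCE A (Python) =====
-- def get_headers_scan(requestMsg):
--     datas = requestMsg.split('\r\n')
--     request_Data = datas[0]
--     datas.remove(datas[0])
--     headers = []
--     for data in datas:
--         if data != '':
--             headers.append(data)
--         else:
--             break
--     return ','.join(headers)
-- ===== SOURCE B (Python) =====
-- def get_headers_scan(requestMsg):
--     start = requestMsg.find('\r\n')
--     if start == -1:
--         return ''
--     start += 2
--     end = requestMsg.find('\r\n\r\n', start - 2)
--     block = requestMsg[start:end] if end != -1 else requestMsg[start:]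
--     if block.endswith('\r\n'):
--         block = block[:-2]
--     return block.replace('\r\n', ',')
-- ===== Notes on version B (the rewrite author's own statement) =====
-- stated objective: alternative
-- what changed: B never builds the list of lines: it locates the header block directly in the string with find (first CRLF and first CRLFCRLF boundary), slices it out, strips a trailing CRLF, and turns the block into the answer with a single replace of CRLF by comma.
import Mathlib
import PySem

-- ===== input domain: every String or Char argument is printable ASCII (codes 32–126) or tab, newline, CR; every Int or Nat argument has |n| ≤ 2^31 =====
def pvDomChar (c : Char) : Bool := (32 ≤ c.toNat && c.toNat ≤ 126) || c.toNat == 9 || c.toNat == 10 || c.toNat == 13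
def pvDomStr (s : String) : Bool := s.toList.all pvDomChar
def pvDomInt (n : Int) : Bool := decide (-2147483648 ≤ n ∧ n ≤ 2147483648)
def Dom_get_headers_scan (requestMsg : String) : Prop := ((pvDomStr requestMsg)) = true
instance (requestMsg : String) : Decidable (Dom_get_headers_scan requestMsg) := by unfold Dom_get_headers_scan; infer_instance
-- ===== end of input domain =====

-- B works directly on the string — boundary search with find, one slice, one replace — instead of
-- building and scanning the list of lines (alternative decomposition, same asymptotic cost).

-- ===== PORT A =====
-- A's for-loop with break: keep lines while non-empty, stop at the first ''.
def pvHeadersLoopA : List String → List String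
  | [] => []
  | d :: rest => if d ≠ "" then d :: pvHeadersLoopA rest else []

def get_headers_scan (requestMsg : String) : String :=
  let datas := (PySem.Str.split? requestMsg "\r\n").getD []
  match datas with
  | [] => ""  -- unreachable: str.split never returns an empty list
  | d0 :: _ =>
    -- datas.remove(datas[0]); d0 ∈ datas, so ValueError is impossible
    let datas' := (PySem.List.remove? datas d0).getD []
    PySem.Str.join "," (pvHeadersLoopA datas')

-- ===== PORT B =====
def get_headers_scan_alt (requestMsg : String) : String :=
  let start0 := PySem.Str.find requestMsg "\r\n"
  if start0 = -1 then ""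
  else
    let start := start0 + 2
    let e := PySem.Str.findFrom requestMsg "\r\n\r\n" (start - 2)
    let block := if e ≠ -1 then PySem.Str.slice requestMsg (some start) (some e)
                 else PySem.Str.slice requestMsg (some start) none
    let block2 := if PySem.Str.endswith block "\r\n" then PySem.Str.slice block none (some (-2)) else block
    PySem.Str.replace block2 "\r\n" ","

-- ===== PRECONDITION & SPEC =====
def Spec_get_headers_scan (requestMsg : String) (out : String) : Prop := out = get_headers_scan_alt requestMsg
instance (requestMsg : String) (out : String) : Decidable (Spec_get_headers_scan requestMsg out) := by unfold Spec_get_headers_scan; infer_instance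

-- ===== CLAIM (what is proved, stated in full; the proofs are below) =====
def Claim_equal_get_headers_scan : Prop := ∀ (requestMsg : String), Dom_get_headers_scan requestMsg → Spec_get_headers_scan requestMsg (get_headers_scan requestMsg)

-- ===== LEMMAS AND PROOFS =====

-- The CRLF separator and the blank-line marker, as char lists.
def pvSep : List Char := ['\r', '\n']
def pvSep2 : List Char := ['\r', '\n', '\r', '\n']

-- Index of the first occurrence of pat (as Python's find, but Option Nat).
def pvFindP (pat : List Char) : List Char → Option Nat
  | [] => none
  | c :: t => if pat.isPrefixOf (c :: t) then some 0 else (pvFindP pat t).map (· + 1)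

-- Python split('\r\n') as (first piece, remaining pieces).
def pvSplitP : List Char → List Char × List (List Char)
  | [] => ([], [])
  | c :: t =>
    if pvSep.isPrefixOf (c :: t) then
      ([], (pvSplitP (t.drop 1)).1 :: (pvSplitP (t.drop 1)).2)
    else
      (c :: (pvSplitP t).1, (pvSplitP t).2)
termination_by l => l.length
decreasing_by all_goals (first | (simp; omega) | simp)

def pvSplitL (l : List Char) : List (List Char) := (pvSplitP l).1 :: (pvSplitP l).2

-- replace('\r\n', ',') as a structural recursion.
def pvRepl : List Char → List Char
  | [] => []
  | c :: t => if pvSep.isPrefixOf (c :: t) then ',' :: pvRepl (t.drop 1) else c :: pvRepl t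
termination_by l => l.length
decreasing_by all_goals (first | (simp; omega) | simp)

def pvTakeUntil : List (List Char) → List (List Char)
  | [] => []
  | p :: ps => if p = [] then [] else p :: pvTakeUntil ps

-- What A computes on the part after the request line.
def pvCore (l : List Char) : List Char := PySem.Chars.join [','] (pvTakeUntil (pvSplitL l))

-- What B computes (before the replace) on the part after the request line.
def pvTrimCut (l : List Char) : List Char :=
  match pvFindP pvSep2 l with
  | some j => l.take j
  | none => l

def pvTrimStrip (b : List Char) : List Char :=
  if PySem.Chars.endswith b pvSep then b.take (b.length - 2) else b

def pvTrim (l : List Char) : List Char :=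
  if pvSep.isPrefixOf l then [] else pvTrimStrip (pvTrimCut l)

lemma pvTrimCut_some (l : List Char) (j : Nat) (h : pvFindP pvSep2 l = some j) :
    pvTrimCut l = l.take j := by
  unfold pvTrimCut
  rw [h]

lemma pvTrimCut_none (l : List Char) (h : pvFindP pvSep2 l = none) :
    pvTrimCut l = l := by
  unfold pvTrimCut
  rw [h]

lemma pvTrim_prefix (l : List Char) (h : pvSep.isPrefixOf l) : pvTrim l = [] := by
  rw [pvTrim, if_pos h]

lemma pvTrim_eq (l : List Char) (h : ¬ pvSep.isPrefixOf l) :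
    pvTrim l = pvTrimStrip (pvTrimCut l) := by
  rw [pvTrim, if_neg h]

-- ---- pvFindP specifications ----
lemma pvFindP_some_spec (pat : List Char) : ∀ (l : List Char) (k : Nat),
    pvFindP pat l = some k → pat <+: l.drop k ∧ ∀ i < k, ¬ pat <+: l.drop i := by
  intro l
  induction l with
  | nil => intro k h; simp [pvFindP] at h
  | cons c t ih =>
    intro k h
    by_cases hp : pat.isPrefixOf (c :: t)
    · simp [pvFindP, hp] at h
      subst h
      exact ⟨(List.isPrefixOf_iff_prefix).1 hp, by omega⟩
    · simp [pvFindP, hp] at h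
      obtain ⟨j, hj, rfl⟩ := h
      obtain ⟨h1, h2⟩ := ih j hj
      refine ⟨by simpa using h1, ?_⟩
      intro i hi
      cases i with
      | zero => simpa [List.isPrefixOf_iff_prefix] using hp
      | succ i' => simpa using h2 i' (by omega)

lemma pvFindP_none_spec (pat : List Char) (hpat : pat ≠ []) : ∀ (l : List Char),
    pvFindP pat l = none → ∀ i, ¬ pat <+: l.drop i := by
  intro l
  induction l with
  | nil =>
    intro _ i hpre
    simp at hpre
    exact hpat hpre
  | cons c t ih =>
    intro h i
    by_cases hp : pat.isPrefixOf (c :: t)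
    · simp [pvFindP, hp] at h
    · simp [pvFindP, hp] at h
      cases i with
      | zero => simpa [List.isPrefixOf_iff_prefix] using hp
      | succ i' => simpa using ih h i'

-- ---- pvSplitP decomposition by the first CRLF ----
lemma pvSplitP_none : ∀ (l : List Char), pvFindP pvSep l = none → pvSplitP l = (l, []) := by
  intro l
  induction l using pvSplitP.induct with
  | case1 => intro _; simp [pvSplitP]
  | case2 c t hp ih =>
    intro h
    simp [pvFindP, hp] at h
  | case3 c t hp ih =>
    intro h
    simp [pvFindP, hp] at h
    rw [pvSplitP, if_neg (by simpa using hp)]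
    rw [ih h]

lemma pvSplitP_some : ∀ (l : List Char) (k : Nat), pvFindP pvSep l = some k →
    pvSplitP l = (l.take k, pvSplitL (l.drop (k + 2))) := by
  intro l
  induction l using pvSplitP.induct with
  | case1 => intro k h; simp [pvFindP] at h
  | case2 c t hp ih =>
    intro k h
    simp [pvFindP, hp] at h
    subst h
    rw [pvSplitP, if_pos hp]
    simp [pvSplitL]
  | case3 c t hp ih =>
    intro k h
    simp [pvFindP, hp] at h
    obtain ⟨j, hj, rfl⟩ := h
    rw [pvSplitP, if_neg (by simpa using hp)]
    rw [ih j hj]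
    simp

lemma pvSplitL_none (l : List Char) (h : pvFindP pvSep l = none) : pvSplitL l = [l] := by
  rw [pvSplitL, pvSplitP_none l h]

lemma pvSplitL_some (l : List Char) (k : Nat) (h : pvFindP pvSep l = some k) :
    pvSplitL l = l.take k :: pvSplitL (l.drop (k + 2)) := by
  rw [pvSplitL, pvSplitP_some l k h]

lemma pvTakeSplit (p0 r : List Char) (m : Nat) (hm : p0.length ≤ m) :
    (p0 ++ r).take m = p0 ++ r.take (m - p0.length) := by
  rw [List.take_append, List.take_of_length_le hm]

-- ---- go-elimination lemmas ----
lemma pvSplitOn_go_eq : ∀ (fuel : Nat) (l cur : List Char) (accL : List (List Char)),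
    l.length + 1 ≤ fuel →
    PySem.Chars.splitOn.go pvSep fuel l cur accL =
      accL.reverse ++ (cur.reverse ++ (pvSplitP l).1) :: (pvSplitP l).2 := by
  intro fuel
  induction fuel with
  | zero => intro l cur accL h; omega
  | succ f ih =>
    intro l cur accL h
    cases l with
    | nil =>
      rw [PySem.Chars.splitOn.go]
      simp [pvSplitP]
      omega
    | cons c t =>
      rw [PySem.Chars.splitOn.go, pvSplitP]
      by_cases hp : pvSep.isPrefixOf (c :: t)
      · rw [if_pos hp, if_pos hp]
        have hlen : pvSep.length = 2 := rfl
        rw [hlen]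
        have hd : (c :: t).drop 2 = t.drop 1 := by simp
        rw [hd]
        rw [ih (t.drop 1) [] (cur.reverse :: accL) (by simp at h ⊢; omega)]
        simp
      · rw [if_neg hp, if_neg hp]
        rw [ih t (c :: cur) accL (by simp at h ⊢; omega)]
        simp

lemma pvSplitOn_eq (l : List Char) : PySem.Chars.splitOn l pvSep = pvSplitL l := by
  rw [PySem.Chars.splitOn, pvSplitOn_go_eq (l.length + 1) l [] [] le_rfl]
  simp [pvSplitL]

lemma pvFind_go_eq (pat : List Char) (hpat : pat ≠ []) : ∀ (l : List Char) (k0 : Nat),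
    PySem.Chars.find.go pat l k0 =
      match pvFindP pat l with
      | none => -1
      | some j => ((k0 + j : Nat) : Int) := by
  intro l
  induction l with
  | nil =>
    intro k0
    rw [PySem.Chars.find.go]
    simp [pvFindP, List.isEmpty_iff, hpat]
  | cons c t ih =>
    intro k0
    rw [PySem.Chars.find.go, pvFindP]
    by_cases hp : pat.isPrefixOf (c :: t)
    · simp [hp]
    · rw [if_neg hp, if_neg (by simpa using hp), ih (k0 + 1)]
      cases h : pvFindP pat t with
      | none => simp
      | some j => simp; ring

lemma pvFind_eq (pat : List Char) (hpat : pat ≠ []) (l : List Char) :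
    PySem.Chars.find l pat =
      match pvFindP pat l with
      | none => -1
      | some j => (j : Int) := by
  rw [PySem.Chars.find, pvFind_go_eq pat hpat l 0]
  cases pvFindP pat l <;> simp

lemma pvFind_eq_none (pat : List Char) (hpat : pat ≠ []) (l : List Char)
    (h : pvFindP pat l = none) : PySem.Chars.find l pat = -1 := by
  rw [pvFind_eq pat hpat l, h]

lemma pvFind_eq_some (pat : List Char) (hpat : pat ≠ []) (l : List Char) (j : Nat)
    (h : pvFindP pat l = some j) : PySem.Chars.find l pat = (j : Int) := by
  rw [pvFind_eq pat hpat l, h]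

lemma pvReplace_go_eq : ∀ (fuel : Nat) (l acc : List Char), l.length ≤ fuel →
    PySem.Chars.replace.go pvSep [','] fuel l acc = acc.reverse ++ pvRepl l := by
  intro fuel
  induction fuel with
  | zero =>
    intro l acc h
    have : l = [] := by cases l <;> simp_all
    subst this
    rw [PySem.Chars.replace.go]
    simp [pvRepl]
  | succ f ih =>
    intro l acc h
    cases l with
    | nil =>
      rw [PySem.Chars.replace.go]
      simp [pvRepl]
      omega
    | cons c t =>
      rw [PySem.Chars.replace.go, pvRepl]
      by_cases hp : pvSep.isPrefixOf (c :: t)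
      · rw [if_pos hp, if_pos hp]
        have hlen : pvSep.length = 2 := rfl
        rw [hlen]
        have hd : (c :: t).drop 2 = t.drop 1 := by simp
        rw [hd]
        rw [ih (t.drop 1) ([','].reverse ++ acc) (by simp at h ⊢; omega)]
        simp
      · rw [if_neg hp, if_neg hp]
        rw [ih t (c :: acc) (by simp at h ⊢; omega)]
        simp

lemma pvReplace_eq (l : List Char) : PySem.Chars.replace l pvSep [','] = pvRepl l := by
  rw [PySem.Chars.replace]
  rw [if_neg (by simp [pvSep])]
  rw [pvReplace_go_eq l.length l [] le_rfl]
  simp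

-- ---- small structural facts ----
lemma pvRepl_sep (x : List Char) : pvRepl (pvSep ++ x) = ',' :: pvRepl x := by
  show pvRepl ('\r' :: '\n' :: x) = ',' :: pvRepl x
  rw [pvRepl]
  simp [pvSep, List.isPrefixOf]

lemma pvRepl_passthru : ∀ (p r : List Char),
    (∀ i < p.length, ¬ pvSep <+: (p ++ r).drop i) → pvRepl (p ++ r) = p ++ pvRepl r := by
  intro p
  induction p with
  | nil => intro r _; simp
  | cons c p' ih =>
    intro r h
    rw [List.cons_append, pvRepl]
    have h0 : ¬ pvSep.isPrefixOf (c :: (p' ++ r)) := by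
      rw [List.isPrefixOf_iff_prefix]
      simpa using h 0 (by simp)
    rw [if_neg h0]
    rw [ih r (fun i hi => by simpa using h (i + 1) (by simp; omega))]
    simp

lemma pvRepl_noocc : ∀ (l : List Char), (∀ i, ¬ pvSep <+: l.drop i) → pvRepl l = l := by
  intro l
  induction l with
  | nil => intro _; simp [pvRepl]
  | cons c t ih =>
    intro h
    rw [pvRepl]
    have h0 : ¬ pvSep.isPrefixOf (c :: t) := by
      rw [List.isPrefixOf_iff_prefix]
      simpa using h 0
    rw [if_neg h0, ih (fun i => by simpa using h (i + 1))]

lemma pvPrefix_of_take {pat l : List Char} {n i : Nat} (h : pat <+: (l.take n).drop i) :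
    pat <+: l.drop i := by
  rw [List.drop_take] at h
  exact h.trans (List.take_prefix _ _)

lemma pvSuffix_iff_drop (y : List Char) : pvSep <:+ y ↔ y.drop (y.length - 2) = pvSep := by
  constructor
  · rintro ⟨r, rfl⟩
    simp [pvSep]
  · intro h
    rw [← h]
    exact List.drop_suffix _ _

lemma pvSep2_of_two (x : List Char) (h1 : pvSep <+: x) (h2 : pvSep <+: x.drop 2) :
    pvSep2 <+: x := by
  obtain ⟨r, rfl⟩ := h1
  simp [pvSep] at h2
  obtain ⟨r2, hr2⟩ := h2
  show pvSep ++ pvSep <+: pvSep ++ r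
  exact (List.prefix_append_right_inj pvSep).2 ⟨r2, hr2⟩

lemma pvSepPrefixSep2 : pvSep <+: pvSep2 := ⟨['\r', '\n'], rfl⟩

-- the first CRLFCRLF occurrence never lets the cut block end in CRLF
lemma pvNoStrip (x : List Char) (m : Nat) (h : pvFindP pvSep2 x = some m) :
    ¬ pvSep <:+ x.take m := by
  intro hs
  obtain ⟨hpre, hmin⟩ := pvFindP_some_spec pvSep2 x m h
  have hle2 : 2 ≤ (x.take m).length := by
    have := hs.length_le
    simpa [pvSep] using this
  have hxm : m + 4 ≤ x.length := by
    have := hpre.length_le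
    simp [pvSep2] at this
    omega
  have hm2 : 2 ≤ m := by simp at hle2; omega
  have hdrop : (x.take m).drop ((x.take m).length - 2) = pvSep := (pvSuffix_iff_drop _).1 hs
  have hlen : (x.take m).length = m := by simp; omega
  rw [hlen] at hdrop
  have h1 : pvSep <+: x.drop (m - 2) := by
    refine pvPrefix_of_take (n := m) ?_
    rw [hdrop]
  have h2 : pvSep <+: (x.drop (m - 2)).drop 2 := by
    rw [List.drop_drop, show m - 2 + 2 = m by omega]
    exact pvSepPrefixSep2.trans hpre
  exact hmin (m - 2) (by omega) (pvSep2_of_two _ h1 h2)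

lemma pvSuffix_shift (p0 t : List Char) (ht : t ≠ []) :
    (pvSep <:+ (p0 ++ pvSep ++ t)) ↔ pvSep <:+ t := by
  rw [pvSuffix_iff_drop, pvSuffix_iff_drop]
  by_cases h2 : 2 ≤ t.length
  · have hL : (p0 ++ pvSep ++ t).length - 2 = (p0 ++ pvSep).length + (t.length - 2) := by
      simp [pvSep]; omega
    rw [hL, List.drop_append]
    rw [show (p0 ++ pvSep).length + (t.length - 2) - (p0 ++ pvSep).length = t.length - 2 by omega]
    rw [List.drop_eq_nil_of_le (by omega)]
    rw [List.nil_append]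
  · obtain ⟨c, rfl⟩ : ∃ c, t = [c] := by
      cases t with
      | nil => exact absurd rfl ht
      | cons c t' =>
        cases t' with
        | nil => exact ⟨c, rfl⟩
        | cons d t'' => simp at h2
    have hL : (p0 ++ pvSep ++ [c]).length - 2 = p0.length + 1 := by simp [pvSep]
    rw [hL, List.append_assoc, List.drop_append]
    have e1 : List.drop (p0.length + 1) p0 = [] := List.drop_eq_nil_of_le (by omega)
    have e2 : p0.length + 1 - p0.length = 1 := by omega
    rw [e1, e2, List.nil_append]
    simp [pvSep]

-- position of the first CRLFCRLF relative to the first CRLF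
lemma pvFindP2_cons (t : List Char) :
    pvFindP pvSep2 (pvSep ++ t) =
      if pvSep.isPrefixOf t then some 0 else (pvFindP pvSep2 t).map (· + 2) := by
  show pvFindP pvSep2 ('\r' :: '\n' :: t) = _
  rw [pvFindP, pvFindP]
  have h1 : pvSep2.isPrefixOf ('\r' :: '\n' :: t) = pvSep.isPrefixOf t := by
    simp [pvSep2, pvSep, List.isPrefixOf]
  have h2 : pvSep2.isPrefixOf ('\n' :: t) = false := by
    simp [pvSep2, List.isPrefixOf]
  rw [h1, h2]
  by_cases hp : pvSep.isPrefixOf t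
  · simp [hp]
  · simp only [hp, Bool.false_eq_true, if_false, Option.map_map]
    cases pvFindP pvSep2 t <;> simp <;> omega

lemma pvFindP2_char : ∀ (l : List Char) (k : Nat), pvFindP pvSep l = some k →
    pvFindP pvSep2 l =
      if pvSep.isPrefixOf (l.drop (k + 2)) then some k
      else (pvFindP pvSep2 (l.drop (k + 2))).map (· + (k + 2)) := by
  intro l
  induction l with
  | nil => intro k h; simp [pvFindP] at h
  | cons c t ih =>
    intro k h
    by_cases hp : pvSep.isPrefixOf (c :: t)
    · simp [pvFindP, hp] at h
      subst h
      obtain ⟨r, hr⟩ := List.isPrefixOf_iff_prefix.1 hp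
      obtain ⟨rfl, rfl⟩ : c = '\r' ∧ t = '\n' :: r := by
        simpa [pvSep] using hr.symm
      have := pvFindP2_cons r
      simpa [pvSep] using this
    · simp [pvFindP, hp] at h
      obtain ⟨j, hj, rfl⟩ := h
      have hs2 : pvSep2.isPrefixOf (c :: t) = false := by
        rw [Bool.eq_false_iff]
        intro hc
        exact hp (List.isPrefixOf_iff_prefix.2
          (pvSepPrefixSep2.trans (List.isPrefixOf_iff_prefix.1 hc)))
      rw [pvFindP, hs2]
      simp only [Bool.false_eq_true, if_false]
      rw [ih j hj]
      by_cases hq : pvSep.isPrefixOf (t.drop (j + 2))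
      · have hdr : (c :: t).drop (j + 1 + 2) = t.drop (j + 2) := by simp
        rw [hdr]
        simp [hq]
      · have hdr : (c :: t).drop (j + 1 + 2) = t.drop (j + 2) := by simp
        rw [hdr]
        simp only [hq, Bool.false_eq_true, if_false, Option.map_map]
        cases pvFindP pvSep2 (t.drop (j + 2)) <;> simp <;> omega

lemma pvSplitP_fst_nil_iff (t : List Char) :
    (pvSplitP t).1 = [] ↔ (t = [] ∨ pvSep.isPrefixOf t = true) := by
  cases t with
  | nil => simp [pvSplitP]
  | cons c t' =>
    rw [pvSplitP]
    by_cases hp : pvSep.isPrefixOf (c :: t')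
    · simp [hp]
    · simp [hp]

-- ---- the heart: A's split-take-join equals B's trim-replace ----
lemma pvHeart : ∀ (n : Nat) (l : List Char), l.length ≤ n → pvCore l = pvRepl (pvTrim l) := by
  intro n
  induction n with
  | zero =>
    intro l hlen
    have hl : l = [] := by cases l <;> simp_all
    subst hl
    simp [pvCore, pvSplitL, pvSplitP, pvTakeUntil, pvTrim, pvTrimCut, pvTrimStrip, pvFindP,
      pvRepl, PySem.Chars.join_nil, PySem.Chars.endswith, pvSep]
  | succ n ihn =>
    intro l hlen
    cases h : pvFindP pvSep l with
    | none =>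
      -- no CRLF at all: one single line, B finds nothing to cut or strip
      have hno : ∀ i, ¬ pvSep <+: l.drop i := pvFindP_none_spec pvSep (by simp [pvSep]) l h
      have hplf : ¬ pvSep.isPrefixOf l := by
        intro hc
        exact hno 0 (by simpa using (List.isPrefixOf_iff_prefix).1 hc)
      have hf2 : pvFindP pvSep2 l = none := by
        cases hf : pvFindP pvSep2 l with
        | none => rfl
        | some m =>
          obtain ⟨hm1, _⟩ := pvFindP_some_spec pvSep2 l m hf
          exact absurd (pvSepPrefixSep2.trans hm1) (hno m)
      have hsf : PySem.Chars.endswith l pvSep = false := by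
        rw [← Bool.not_eq_true, PySem.Chars.endswith_iff]
        intro hs
        have hd := (pvSuffix_iff_drop l).1 hs
        exact hno (l.length - 2) (by rw [hd])
      rw [pvCore, pvSplitL_none l h, pvTrim_eq l hplf, pvTrimCut_none l hf2, pvTrimStrip, hsf]
      simp only [Bool.false_eq_true, if_false]
      rw [pvRepl_noocc l hno]
      by_cases hnil : l = []
      · subst hnil
        simp [pvTakeUntil, PySem.Chars.join_nil]
      · rw [pvTakeUntil, if_neg hnil, pvTakeUntil, PySem.Chars.join_singleton]
    | some K =>
      obtain ⟨hpre, hmin⟩ := pvFindP_some_spec pvSep l K h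
      by_cases hK0 : K = 0
      · -- the first line is empty: A stops at once, B cuts the empty block
        subst hK0
        have hp : pvSep.isPrefixOf l := List.isPrefixOf_iff_prefix.2 (by simpa using hpre)
        rw [pvCore, pvSplitL_some l 0 h, List.take_zero, pvTakeUntil, if_pos rfl,
          PySem.Chars.join_nil, pvTrim_prefix l hp]
        simp [pvRepl]
      · -- a nonempty first header line before the first CRLF
        have hK2 : K + 2 ≤ l.length := by
          obtain ⟨r, hr⟩ := hpre
          have hlen2 := congrArg List.length hr
          rw [List.length_append, List.length_drop] at hlen2
          rw [show pvSep.length = 2 from rfl] at hlen2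
          omega
        have hts : l.drop K = pvSep ++ l.drop (K + 2) := by
          obtain ⟨r, hr⟩ := hpre
          have h2 : l.drop (K + 2) = r := by
            have hdd : l.drop (K + 2) = (l.drop K).drop 2 := by rw [List.drop_drop]
            rw [hdd, ← hr]
            simp [pvSep]
          rw [h2, hr]
        set t := l.drop (K + 2) with htdef
        set p0 := l.take K with hp0def
        have hl : l = p0 ++ (pvSep ++ t) := by
          rw [hp0def, htdef]
          rw [← hts, List.take_append_drop]
        have hp0len : p0.length = K := by
          rw [hp0def, List.length_take]
          omega
        have hp0ne : p0 ≠ [] := by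
          intro hc
          rw [hc] at hp0len
          simp at hp0len
          omega
        have htlen : t.length + (K + 2) = l.length := by
          rw [htdef, List.length_drop]
          omega
        have hplf : ¬ pvSep.isPrefixOf l := by
          intro hc
          exact hmin 0 (by omega) (by simpa using (List.isPrefixOf_iff_prefix).1 hc)
        have hnoP0 : ∀ i, ¬ pvSep <+: p0.drop i := by
          intro i hp
          by_cases hi : i < K
          · exact hmin i hi (pvPrefix_of_take hp)
          · rw [List.drop_eq_nil_of_le (by omega)] at hp
            simp [pvSep] at hp
        have iht := ihn t (by rw [htdef, List.length_drop]; omega)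
        by_cases hpt : pvSep.isPrefixOf t
        · -- the second line is empty: headers = [first line]
          have hf2 : pvFindP pvSep2 l = some K := by
            rw [pvFindP2_char l K h, ← htdef, if_pos hpt]
          have hsf : PySem.Chars.endswith p0 pvSep = false := by
            rw [← Bool.not_eq_true, PySem.Chars.endswith_iff]
            intro hs
            have hle := hs.length_le
            rw [hp0len] at hle
            have hd := (pvSuffix_iff_drop p0).1 hs
            rw [hp0len] at hd
            refine hmin (K - 2) (by omega) (pvPrefix_of_take (n := K) ?_)
            rw [← hp0def, hd]
          have hfst : (pvSplitP t).1 = [] := (pvSplitP_fst_nil_iff t).2 (Or.inr hpt)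
          rw [pvCore, pvSplitL_some l K h, ← htdef, ← hp0def, pvTakeUntil, if_neg hp0ne,
            pvSplitL, pvTakeUntil, if_pos hfst, PySem.Chars.join_singleton]
          rw [pvTrim_eq l hplf, pvTrimCut_some l K hf2, ← hp0def, pvTrimStrip, hsf]
          simp only [Bool.false_eq_true, if_false]
          rw [pvRepl_noocc p0 hnoP0]
        · have hLHSne : ∀ (ht : (pvSplitP t).1 ≠ []), pvCore l = p0 ++ ',' :: pvCore t := by
            intro hXne
            rw [pvCore, pvSplitL_some l K h, ← htdef, ← hp0def, pvTakeUntil, if_neg hp0ne]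
            rw [pvCore, pvSplitL, pvTakeUntil, if_neg hXne]
            rw [PySem.Chars.join_cons_cons]
            rw [List.append_assoc]
            rfl
          cases hft : pvFindP pvSep2 t with
          | some j =>
            -- B cuts at the first CRLFCRLF, which lies inside t
            have htne : t ≠ [] := by
              intro hc
              rw [hc] at hft
              simp [pvFindP] at hft
            have hXne : (pvSplitP t).1 ≠ [] := by
              simp only [ne_eq, pvSplitP_fst_nil_iff t]
              push_neg
              exact ⟨htne, by simpa using hpt⟩
            rw [hLHSne hXne]
            have hf2 : pvFindP pvSep2 l = some (j + (K + 2)) := by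
              rw [pvFindP2_char l K h, ← htdef, if_neg hpt, hft]
              rfl
            have htake : l.take (j + (K + 2)) = p0 ++ (pvSep ++ t.take j) := by
              rw [hl, pvTakeSplit p0 _ _ (by rw [hp0len]; omega), hp0len,
                show j + (K + 2) - K = 2 + j by omega,
                pvTakeSplit pvSep _ _ (by simp only [pvSep, List.length_cons, List.length_nil]; omega),
                show pvSep.length = 2 from rfl,
                show 2 + j - 2 = j by omega]
            have hsf : PySem.Chars.endswith (l.take (j + (K + 2))) pvSep = false := by
              rw [← Bool.not_eq_true, PySem.Chars.endswith_iff]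
              exact pvNoStrip l (j + (K + 2)) hf2
            rw [pvTrim_eq l hplf, pvTrimCut_some l (j + (K + 2)) hf2, pvTrimStrip, hsf]
            simp only [Bool.false_eq_true, if_false]
            rw [htake, pvRepl_passthru p0 (pvSep ++ t.take j) ?side, pvRepl_sep]
            · rw [iht, pvTrim_eq t hpt, pvTrimCut_some t j hft, pvTrimStrip]
              rw [show PySem.Chars.endswith (t.take j) pvSep = false by
                rw [← Bool.not_eq_true, PySem.Chars.endswith_iff]
                exact pvNoStrip t j hft]
              simp only [Bool.false_eq_true, if_false]
            · intro i hi hp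
              rw [← htake] at hp
              rw [hp0len] at hi
              exact hmin i hi (pvPrefix_of_take hp)
          | none =>
            have hf2 : pvFindP pvSep2 l = none := by
              rw [pvFindP2_char l K h, ← htdef, if_neg hpt, hft]
              rfl
            rw [pvTrim_eq l hplf, pvTrimCut_none l hf2, pvTrimStrip]
            by_cases htnil : t = []
            · -- the message is exactly the request line plus one trailing CRLF
              have hl' : l = p0 ++ pvSep := by rw [hl, htnil, List.append_nil]
              have hse : PySem.Chars.endswith l pvSep = true := by
                rw [PySem.Chars.endswith_iff, hl']
                exact List.suffix_append p0 pvSep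
              rw [hse]
              simp only [if_true]
              have hlen2 : l.length - 2 = K := by
                have ht0 : t.length = 0 := by rw [htnil]; rfl
                omega
              have htake : l.take (l.length - 2) = p0 := by
                rw [hlen2, hl', pvTakeSplit p0 _ _ (by rw [hp0len]), hp0len]
                simp
              rw [htake, pvRepl_noocc p0 hnoP0]
              have hfst : (pvSplitP t).1 = [] := (pvSplitP_fst_nil_iff t).2 (Or.inl htnil)
              rw [pvCore, pvSplitL_some l K h, ← htdef, ← hp0def, pvTakeUntil, if_neg hp0ne,
                pvSplitL, pvTakeUntil, if_pos hfst, PySem.Chars.join_singleton]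
            · have hXne : (pvSplitP t).1 ≠ [] := by
                simp only [ne_eq, pvSplitP_fst_nil_iff t]
                push_neg
                exact ⟨htnil, by simpa using hpt⟩
              rw [hLHSne hXne]
              have hshift := pvSuffix_shift p0 t htnil
              rw [show p0 ++ pvSep ++ t = l by rw [hl, List.append_assoc]] at hshift
              by_cases hsuf : pvSep <:+ t
              · -- the tail ends in CRLF: both drop that trailing CRLF
                have hT2 : 2 ≤ t.length := by
                  have := hsuf.length_le
                  simpa [pvSep] using this
                have hse : PySem.Chars.endswith l pvSep = true := by
                  rw [PySem.Chars.endswith_iff]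
                  exact hshift.2 hsuf
                rw [hse]
                simp only [if_true]
                have hlen2 : l.length - 2 = (t.length - 2) + (K + 2) := by omega
                have htake : l.take (l.length - 2) = p0 ++ (pvSep ++ t.take (t.length - 2)) := by
                  rw [hlen2, hl, pvTakeSplit p0 _ _ (by rw [hp0len]; omega), hp0len,
                    show (t.length - 2) + (K + 2) - K = 2 + (t.length - 2) by omega,
                    pvTakeSplit pvSep _ _ (by simp only [pvSep, List.length_cons, List.length_nil]; omega),
                    show pvSep.length = 2 from rfl,
                    show 2 + (t.length - 2) - 2 = t.length - 2 by omega]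
                rw [htake, pvRepl_passthru p0 (pvSep ++ t.take (t.length - 2)) ?side2, pvRepl_sep]
                · rw [iht, pvTrim_eq t hpt, pvTrimCut_none t hft, pvTrimStrip]
                  rw [show PySem.Chars.endswith t pvSep = true by
                    rw [PySem.Chars.endswith_iff]; exact hsuf]
                  simp only [if_true]
                · intro i hi hp
                  rw [← htake] at hp
                  rw [hp0len] at hi
                  exact hmin i hi (pvPrefix_of_take hp)
              · have hse : PySem.Chars.endswith l pvSep = false := by
                  rw [← Bool.not_eq_true, PySem.Chars.endswith_iff]
                  intro hc
                  exact hsuf (hshift.1 hc)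
                rw [hse]
                simp only [Bool.false_eq_true, if_false]
                rw [hl, pvRepl_passthru p0 (pvSep ++ t) ?side3, pvRepl_sep]
                · rw [iht, pvTrim_eq t hpt, pvTrimCut_none t hft, pvTrimStrip]
                  rw [show PySem.Chars.endswith t pvSep = false by
                    rw [← Bool.not_eq_true, PySem.Chars.endswith_iff]; exact hsuf]
                  simp only [Bool.false_eq_true, if_false]
                · intro i hi hp
                  rw [← hl] at hp
                  rw [hp0len] at hi
                  exact hmin i hi hp

-- ---- top-level reductions ----
lemma pvLoopA_map (ps : List (List Char)) :
    pvHeadersLoopA (ps.map String.ofList) = (pvTakeUntil ps).map String.ofList := by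
  induction ps with
  | nil => simp [pvHeadersLoopA, pvTakeUntil]
  | cons p ps ih =>
    rw [List.map_cons, pvHeadersLoopA, pvTakeUntil]
    have hne : (String.ofList p ≠ "") ↔ p ≠ [] := by
      constructor
      · intro h hp; subst hp; exact h rfl
      · intro h hp
        exact h (by simpa using congrArg String.toList hp)
    by_cases hp : p = []
    · simp [hp]
    · rw [if_pos (hne.2 hp), if_neg hp, ih, List.map_cons]

lemma pvA_eq (s : String) :
    get_headers_scan s = String.ofList
      (match pvFindP pvSep s.toList with
       | none => []
       | some k => pvCore (s.toList.drop (k + 2))) := by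
  rw [get_headers_scan]
  rw [PySem.Str.split?, PySem.Chars.split?]
  rw [show ("\r\n" : String).toList = pvSep from rfl]
  rw [if_neg (by simp [pvSep])]
  rw [pvSplitOn_eq, pvSplitL]
  simp only [Option.map_some, Option.getD_some, List.map_cons]
  rw [PySem.List.remove?_cons_self]
  simp only [Option.getD_some]
  rw [pvLoopA_map]
  rw [PySem.Str.join]
  simp only [List.map_map, Function.comp_def, String.toList_ofList, List.map_id']
  rw [show ("," : String).toList = [','] from rfl]
  cases h : pvFindP pvSep s.toList with
  | none =>
    rw [pvSplitP_none s.toList h]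
    simp [pvTakeUntil, PySem.Chars.join_nil]
  | some k =>
    rw [pvSplitP_some s.toList k h]
    rfl

lemma pvB_eq (s : String) :
    get_headers_scan_alt s = String.ofList
      (match pvFindP pvSep s.toList with
       | none => []
       | some k => pvRepl (pvTrim (s.toList.drop (k + 2)))) := by
  simp only [get_headers_scan_alt]
  rw [PySem.Str.find, show ("\r\n" : String).toList = pvSep from rfl]
  cases h : pvFindP pvSep s.toList with
  | none =>
    rw [pvFind_eq_none pvSep (by simp [pvSep]) s.toList h]
    simp
  | some k =>
    rw [pvFind_eq_some pvSep (by simp [pvSep]) s.toList k h]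
    obtain ⟨hpre, hmin⟩ := pvFindP_some_spec pvSep s.toList k h
    have hk2 : k + 2 ≤ s.toList.length := by
      obtain ⟨r, hr⟩ := hpre
      have hlen := congrArg List.length hr
      rw [List.length_append, List.length_drop] at hlen
      rw [show pvSep.length = 2 from rfl] at hlen
      omega
    have hts : s.toList.drop k = pvSep ++ s.toList.drop (k + 2) := by
      obtain ⟨r, hr⟩ := hpre
      have h2 : s.toList.drop (k + 2) = r := by
        have hdd : s.toList.drop (k + 2) = (s.toList.drop k).drop 2 := by
          rw [List.drop_drop]
        rw [hdd, ← hr]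
        simp [pvSep]
      rw [h2, hr]
    rw [if_neg (by omega : ¬ ((k : Int) = -1))]
    rw [PySem.Str.findFrom, show ("\r\n\r\n" : String).toList = pvSep2 from rfl]
    rw [show ((k : Int) + 2 - 2) = ((k : Nat) : Int) by ring]
    rw [PySem.Chars.findFrom_natCast s.toList pvSep2 k (by omega)]
    rw [hts]
    set t := s.toList.drop (k + 2) with htdef
    show _ = String.ofList (pvRepl (pvTrim t))
    by_cases hpt : pvSep.isPrefixOf t
    · -- the line after the request line is empty: B cuts an empty block
      have hf0 : pvFindP pvSep2 (pvSep ++ t) = some 0 := by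
        rw [pvFindP2_cons, if_pos hpt]
      rw [pvFind_eq_some pvSep2 (by simp [pvSep2]) _ 0 hf0]
      rw [if_neg (by omega : ¬ ((0 : Nat) : Int) = -1)]
      rw [if_pos (by omega : ((k : Int) + ((0 : Nat) : Int) ≠ -1))]
      rw [show ((k : Int) + ((0 : Nat) : Int)) = ((k : Nat) : Int) by push_cast; ring]
      rw [show ((k : Int) + 2) = (((k + 2 : Nat)) : Int) by push_cast; ring]
      rw [PySem.Str.slice, PySem.Chars.slice_eq_listSlice, PySem.List.slice_natCast]
      rw [show k - (k + 2) = 0 by omega, List.take_zero]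
      rw [PySem.Str.endswith, String.toList_ofList,
        show ("\r\n" : String).toList = pvSep from rfl]
      rw [show PySem.Chars.endswith [] pvSep = false from rfl]
      simp only [Bool.false_eq_true, if_false]
      rw [PySem.Str.replace, String.toList_ofList,
        show ("\r\n" : String).toList = pvSep from rfl,
        show ("," : String).toList = [','] from rfl, pvReplace_eq]
      rw [pvTrim_prefix _ hpt]
    · cases hft : pvFindP pvSep2 t with
      | some j =>
        rw [pvFind_eq_some pvSep2 (by simp [pvSep2]) _ (j + 2) (by rw [pvFindP2_cons, if_neg hpt, hft]; rfl)]
        rw [if_neg (by omega : ¬ (((j + 2 : Nat)) : Int) = -1)]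
        rw [if_pos (by omega : ((k : Int) + (((j + 2 : Nat)) : Int) ≠ -1))]
        rw [show ((k : Int) + (((j + 2 : Nat)) : Int)) = (((k + j + 2 : Nat)) : Int) by push_cast; ring]
        rw [show ((k : Int) + 2) = (((k + 2 : Nat)) : Int) by push_cast; ring]
        rw [PySem.Str.slice, PySem.Chars.slice_eq_listSlice, PySem.List.slice_natCast]
        rw [show k + j + 2 - (k + 2) = j by omega]
        -- drop (k+2) s.toList is t by definition
        rw [← htdef]
        have hnostrip : PySem.Chars.endswith (List.take j t) pvSep = false := by
          rw [← Bool.not_eq_true, PySem.Chars.endswith_iff]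
          exact pvNoStrip t j hft
        rw [PySem.Str.endswith, String.toList_ofList,
          show ("\r\n" : String).toList = pvSep from rfl, hnostrip]
        simp only [Bool.false_eq_true, if_false]
        rw [PySem.Str.replace, String.toList_ofList,
          show ("\r\n" : String).toList = pvSep from rfl,
          show ("," : String).toList = [','] from rfl, pvReplace_eq]
        rw [pvTrim_eq _ hpt, pvTrimCut_some _ j hft]
        rw [pvTrimStrip, hnostrip]
        simp only [Bool.false_eq_true, if_false]
      | none =>
        rw [pvFind_eq_none pvSep2 (by simp [pvSep2]) _ (by rw [pvFindP2_cons, if_neg hpt, hft]; rfl)]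
        rw [if_pos rfl]
        rw [if_neg (by simp : ¬ ((-1 : Int) ≠ -1))]
        rw [show ((k : Int) + 2) = (((k + 2 : Nat)) : Int) by push_cast; ring]
        rw [PySem.Str.slice, PySem.Chars.slice_eq_listSlice, PySem.List.slice_from_natCast]
        rw [← htdef]
        rw [PySem.Str.endswith, String.toList_ofList,
          show ("\r\n" : String).toList = pvSep from rfl]
        rw [pvTrim_eq _ hpt, pvTrimCut_none _ hft]
        rw [pvTrimStrip]
        by_cases he : PySem.Chars.endswith t pvSep
        · rw [if_pos he, if_pos he]
          rw [PySem.Str.slice, String.toList_ofList, PySem.Chars.slice_eq_listSlice,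
            PySem.List.slice_to_neg_ofNat _ 2 (by norm_num)]
          rw [PySem.Str.replace, String.toList_ofList,
            show ("\r\n" : String).toList = pvSep from rfl,
            show ("," : String).toList = [','] from rfl, pvReplace_eq]
        · rw [if_neg he, if_neg he]
          rw [PySem.Str.replace, String.toList_ofList,
            show ("\r\n" : String).toList = pvSep from rfl,
            show ("," : String).toList = [','] from rfl, pvReplace_eq]

-- ===== VERDICT (by name: the statement is the Claim_ definition above) =====
theorem get_headers_scan_spec : Claim_equal_get_headers_scan := by
  intro s _
  unfold Spec_get_headers_scan
  rw [pvA_eq, pvB_eq]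
  cases h : pvFindP pvSep s.toList with
  | none => rfl
  | some k => simp only []; rw [pvHeart (s.toList.drop (k + 2)).length _ le_rfl]
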